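-- pv_equiv track=rewrite | github.com/VIROOPAKSHC/Getting-Started-Competitive-Programming-NPTEL | Week-1/Prog-Assgn-2.py | will_visit_all_cups
-- ===== SOURCE A (Python) =====
-- def will_visit_all_cups(n):
--     positions = set()
--     current_pos = 0
--
--     while True:
--         if current_pos in positions:
--             return "NO"
--         positions.add(current_pos)
--         if len(positions) == n:
--             return "YES"
--
--         current_pos = (current_pos + len(positions)) % n
-- ===== SOURCE B (Python) =====
-- def will_visit_all_cups(n):
--     # The walk visits all n cups iff n is a power of two: strip factors of 2
--     # and check the odd part is 1.  Non-positive n never completes the walk.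
--     if n <= 0:
--         return "NO"
--     while n % 2 == 0:
--         n //= 2
--     return "YES" if n == 1 else "NO"
-- ===== Notes on version B (the rewrite author's own statement) =====
-- stated objective: faster
-- what changed: A simulates the triangular-number walk with a visited-set in O(n); B uses the number-theoretic fact that the walk covers all cups iff n is a power of two, stripping factors of 2 and checking the odd part is 1 in O(log n).
-- outside the precondition, e.g. on will_visit_all_cups(0): A raises ZeroDivisionError, B returns 'NO'
import Mathlib
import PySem

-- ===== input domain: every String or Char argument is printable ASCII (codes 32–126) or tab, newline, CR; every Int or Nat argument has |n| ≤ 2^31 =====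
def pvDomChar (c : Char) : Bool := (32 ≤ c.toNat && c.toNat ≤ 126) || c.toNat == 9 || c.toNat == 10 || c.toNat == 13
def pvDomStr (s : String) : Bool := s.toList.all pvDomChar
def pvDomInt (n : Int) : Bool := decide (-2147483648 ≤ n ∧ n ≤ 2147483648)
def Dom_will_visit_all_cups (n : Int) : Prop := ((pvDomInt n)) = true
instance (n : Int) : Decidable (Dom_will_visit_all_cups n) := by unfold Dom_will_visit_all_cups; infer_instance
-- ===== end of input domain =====

-- B replaces A's O(n) visited-set walk simulation by an O(log n) power-of-two test
-- (the walk visits all n cups iff n is a power of two); equal on all n ≠ 0 (A raises on n = 0).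


-- ===== PORT A =====
-- the 'while True' loop; fuel n.natAbs + 1 is a totality guard only (for n ≠ 0 the loop
-- provably returns within that many iterations, see the lemmas below)
def loopA (n : Int) : Nat → PySem.Set Int → Int → String
  | 0, _, _ => "NO"
  | fuel+1, positions, current_pos =>
    if PySem.Set.contains positions current_pos then "NO"
    else
      let positions' := PySem.Set.add positions current_pos
      if PySem.Set.len positions' = n then "YES"
      else loopA n fuel positions' (PySem.Int.mod (current_pos + PySem.Set.len positions') n)

def will_visit_all_cups (n : Int) : String :=
  loopA n (n.natAbs + 1) PySem.Set.empty 0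

-- ===== PORT B =====
-- 'while n % 2 == 0: n //= 2'; the '1 ≤ n' in the guard is a totality guard only
-- (B only runs the loop when 1 ≤ n, where it always holds)
def oddPart (n : Int) : Int :=
  if h : 1 ≤ n ∧ PySem.Int.mod n 2 = 0 then oddPart (PySem.Int.floordiv n 2) else n
termination_by n.toNat
decreasing_by
  have h2 : (2:Int) ∣ n := (PySem.Int.mod_eq_zero_iff_dvd n 2).mp h.2
  have hf : PySem.Int.floordiv n 2 = n / 2 := PySem.Int.floordiv_eq_ediv_of_pos (by norm_num)
  rw [hf]
  omega

def will_visit_all_cups_alt (n : Int) : String :=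
  if n ≤ 0 then "NO"
  else if oddPart n = 1 then "YES" else "NO"

-- ===== PRECONDITION & SPEC =====
-- Pre_ excludes only n = 0, where A raises ZeroDivisionError at '% n'.
def Pre_will_visit_all_cups (n : Int) : Prop := n ≠ 0
instance (n : Int) : Decidable (Pre_will_visit_all_cups n) := by unfold Pre_will_visit_all_cups; infer_instance
def pvWitness_will_visit_all_cups : Int := (8)

def Spec_will_visit_all_cups (n : Int) (out : String) : Prop := out = will_visit_all_cups_alt n
instance (n : Int) (out : String) : Decidable (Spec_will_visit_all_cups n out) := by unfold Spec_will_visit_all_cups; infer_instance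

-- ===== CLAIM (what is proved, stated in full; the proofs are below) =====
def Claim_equal_will_visit_all_cups : Prop := ∀ (n : Int), Dom_will_visit_all_cups n → Pre_will_visit_all_cups n → Spec_will_visit_all_cups n (will_visit_all_cups n)

-- ===== LEMMAS AND PROOFS =====

-- triangular numbers
def tri (j : Nat) : Nat := j * (j+1) / 2

theorem tri_two (j : Nat) : 2 * tri j = j * (j+1) := by
  have h : 2 ∣ j * (j+1) := (Nat.even_mul_succ_self j).two_dvd
  unfold tri; omega

theorem tri_succ (j : Nat) : tri (j+1) = tri j + (j+1) := by
  have h1 := tri_two j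
  have h2 := tri_two (j+1)
  have h3 : (j+1) * (j+1+1) = j * (j+1) + 2*(j+1) := by ring
  omega

-- the position sequence of A's walk: cpos n j = T_j % n
def cpos (n : Int) : Nat → Int
  | 0 => 0
  | j+1 => PySem.Int.mod (cpos n j + ((j : Int) + 1)) n

theorem mod_sub_dvd (a n : Int) : n ∣ (PySem.Int.mod a n - a) := by
  refine ⟨-(PySem.Int.floordiv a n), ?_⟩
  have h := PySem.Int.floordiv_mul_add_mod a n
  linear_combination h

theorem dvd_cpos_sub_tri (n : Int) (j : Nat) : n ∣ (cpos n j - (tri j : Int)) := by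
  induction j with
  | zero => simp [cpos, tri]
  | succ j ih =>
    have h1 := mod_sub_dvd (cpos n j + ((j : Int) + 1)) n
    have h2 := dvd_add h1 ih
    have h3 : (PySem.Int.mod (cpos n j + ((j : Int) + 1)) n - (cpos n j + ((j : Int) + 1)))
        + (cpos n j - (tri j : Int)) = cpos n (j+1) - ((tri (j+1) : Nat) : Int) := by
      rw [tri_succ]; push_cast; simp only [cpos]; ring
    rwa [h3] at h2

theorem cpos_bounds_pos {n : Int} (hn : 0 < n) (j : Nat) : 0 ≤ cpos n j ∧ cpos n j < n := by
  cases j with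
  | zero => exact ⟨le_refl 0, hn⟩
  | succ j => exact ⟨PySem.Int.mod_nonneg _ hn, PySem.Int.mod_lt _ hn⟩

theorem cpos_bounds_neg {n : Int} (hn : n < 0) (j : Nat) : n < cpos n j ∧ cpos n j ≤ 0 := by
  cases j with
  | zero => exact ⟨hn, le_refl 0⟩
  | succ j => exact PySem.Int.mod_neg_bounds _ hn

theorem cpos_eq_iff {n : Int} (hn : n ≠ 0) (i j : Nat) :
    cpos n i = cpos n j ↔ n ∣ ((tri j : Int) - tri i) := by
  have hi := dvd_cpos_sub_tri n i
  have hj := dvd_cpos_sub_tri n j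
  constructor
  · intro h
    have hd := dvd_sub hi hj
    have he : (cpos n i - (tri i : Int)) - (cpos n j - (tri j : Int)) = (tri j : Int) - tri i := by
      rw [h]; ring
    rwa [he] at hd
  · intro h
    have hd := dvd_add (dvd_sub hi hj) (dvd_neg.mpr h)
    have he : ((cpos n i - (tri i : Int)) - (cpos n j - (tri j : Int))) + -((tri j : Int) - tri i)
        = cpos n i - cpos n j := by ring
    rw [he] at hd
    obtain ⟨k, hk⟩ := hd
    have habs : |cpos n i - cpos n j| < |n| := by
      rcases lt_or_gt_of_ne hn with hneg | hpos
      · have b1 := cpos_bounds_neg hneg i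
        have b2 := cpos_bounds_neg hneg j
        rw [abs_lt]; constructor <;> [skip; skip] <;> simp [abs_of_neg hneg] <;> omega
      · have b1 := cpos_bounds_pos hpos i
        have b2 := cpos_bounds_pos hpos j
        rw [abs_lt]; constructor <;> simp [abs_of_pos hpos] <;> omega
    by_cases hk0 : k = 0
    · rw [hk0, mul_zero] at hk; omega
    · exfalso
      rw [hk, abs_mul] at habs
      have h1 : (1:Int) ≤ |k| := by
        rcases abs_pos.mpr hk0 with h; omega
      nlinarith [abs_nonneg n]

-- pigeonhole: a collision always occurs within the first n.natAbs + 1 positions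
theorem exists_collision (n : Int) (hn : n ≠ 0) :
    ∃ j, j ≤ n.natAbs ∧ ∃ i < j, cpos n i = cpos n j := by
  have hN : 0 < n.natAbs := by omega
  set lo : Int := if 0 < n then 0 else n + 1 with hlo
  have hbound : ∀ i : Nat, (cpos n i - lo).toNat < n.natAbs := by
    intro i
    rcases lt_or_gt_of_ne hn with hneg | hpos
    · have b := cpos_bounds_neg hneg i
      have : ¬ (0 < n) := by omega
      simp only [hlo, if_neg this]; omega
    · have b := cpos_bounds_pos hpos i
      simp only [hlo, if_pos hpos]; omega
  have hlo_le : ∀ i : Nat, lo ≤ cpos n i := by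
    intro i
    rcases lt_or_gt_of_ne hn with hneg | hpos
    · have b := cpos_bounds_neg hneg i
      have : ¬ (0 < n) := by omega
      simp only [hlo, if_neg this]; omega
    · have b := cpos_bounds_pos hpos i
      simp only [hlo, if_pos hpos]; omega
  let f : Fin (n.natAbs + 1) → Fin n.natAbs := fun i => ⟨(cpos n i - lo).toNat, hbound i⟩
  have hcard : Fintype.card (Fin n.natAbs) < Fintype.card (Fin (n.natAbs + 1)) := by simp
  obtain ⟨a, b, hab, hfab⟩ := Fintype.exists_ne_map_eq_of_card_lt f hcard
  have heq : cpos n a = cpos n b := by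
    have h1 := hlo_le a
    have h2 := hlo_le b
    have h3 : (cpos n a - lo).toNat = (cpos n b - lo).toNat := congrArg Fin.val hfab
    omega
  have hvne : (a : Nat) ≠ (b : Nat) := fun h => hab (Fin.ext h)
  rcases Nat.lt_or_ge (a : Nat) (b : Nat) with hlt | hge
  · exact ⟨b, by omega, a, hlt, heq⟩
  · have hlt : (b : Nat) < (a : Nat) := by omega
    exact ⟨a, by omega, b, hlt, heq.symm⟩

-- the loop invariant / run lemma
theorem loopA_succ (n : Int) (k : Nat) (pos : PySem.Set Int) (cur : Int) :
    loopA n (k+1) pos cur =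
      if PySem.Set.contains pos cur then "NO"
      else if PySem.Set.len (PySem.Set.add pos cur) = n then "YES"
      else loopA n k (PySem.Set.add pos cur)
        (PySem.Int.mod (cur + PySem.Set.len (PySem.Set.add pos cur)) n) := rfl

-- the loop invariant / run lemma
theorem runA (n : Int) (J : Nat)
    (hJ : ∃ i < J, cpos n i = cpos n J)
    (hmin : ∀ j < J, ¬ ∃ i < j, cpos n i = cpos n j) :
    ∀ k j, j ≤ J → (1 ≤ n → j < n.toNat) → J + 1 ≤ j + k →
    loopA n k ((List.range j).map (cpos n)) (cpos n j) =
      if 1 ≤ n ∧ n.toNat ≤ J then "YES" else "NO" := by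
  intro k
  induction k with
  | zero => intro j h1 h2 h3; omega
  | succ k ih =>
    intro j hjJ hjn hfuel
    rw [loopA_succ]
    by_cases hcol : ∃ i < j, cpos n i = cpos n j
    · -- collision now: j = J, loop returns "NO"
      have hb : PySem.Set.contains ((List.range j).map (cpos n)) (cpos n j) = true := by
        simp only [PySem.Set.contains, List.contains_iff_mem, List.mem_map, List.mem_range]
        obtain ⟨i, hi, he⟩ := hcol
        exact ⟨i, hi, he⟩
      rw [if_pos hb]
      have hjeq : j = J := by
        by_contra hne
        exact hmin j (by omega) hcol
      have hng : ¬ (1 ≤ n ∧ n.toNat ≤ J) := by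
        rintro ⟨hn1, hnJ⟩
        have := hjn hn1
        omega
      rw [if_neg hng]
    · have hnotmem : cpos n j ∉ (List.range j).map (cpos n) := by
        simp only [List.mem_map, List.mem_range]
        rintro ⟨i, hi, he⟩
        exact hcol ⟨i, hi, he⟩
      have hb : PySem.Set.contains ((List.range j).map (cpos n)) (cpos n j) = false := by
        simp [PySem.Set.contains, hnotmem]
      rw [if_neg (by simp only [hb]; decide)]
      have hjJ' : j < J := by
        rcases Nat.lt_or_ge j J with h | h
        · exact h
        · have hje : j = J := by omega
          exact absurd (hje ▸ hJ) hcol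
      have hb' : List.contains ((List.range j).map (cpos n)) (cpos n j) = false := hb
      have hadd : PySem.Set.add ((List.range j).map (cpos n)) (cpos n j)
          = (List.range (j+1)).map (cpos n) := by
        simp only [PySem.Set.add, PySem.Set.contains, hb', Bool.false_eq_true, if_false,
          List.range_succ, List.map_append, List.map_cons, List.map_nil]
      rw [hadd]
      have hlen : PySem.Set.len ((List.range (j+1)).map (cpos n)) = ((j : Int) + 1) := by
        simp [PySem.Set.len]
      rw [hlen]
      by_cases hsz : ((j : Int) + 1) = n
      · rw [if_pos hsz]
        have hn1 : (1:Int) ≤ n := by omega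
        have hle : n.toNat ≤ J := by omega
        rw [if_pos ⟨hn1, hle⟩]
      · rw [if_neg hsz]
        have hc : PySem.Int.mod (cpos n j + ((j : Int) + 1)) n = cpos n (j+1) := rfl
        rw [hc]
        apply ih (j+1) (by omega) ?_ (by omega)
        intro hn1
        have := hjn hn1
        omega

theorem A_char (n : Int) (hn : n ≠ 0) :
    will_visit_all_cups n =
      if 1 ≤ n ∧ ∀ j < n.toNat, ¬ ∃ i < j, cpos n i = cpos n j then "YES" else "NO" := by
  have hex : ∃ j, ∃ i < j, cpos n i = cpos n j := by
    obtain ⟨j, _, h⟩ := exists_collision n hn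
    exact ⟨j, h⟩
  set J := Nat.find hex with hJdef
  have hJ : ∃ i < J, cpos n i = cpos n J := Nat.find_spec hex
  have hmin : ∀ j < J, ¬ ∃ i < j, cpos n i = cpos n j := fun j hj => Nat.find_min hex hj
  have hJle : J ≤ n.natAbs := by
    obtain ⟨j, hjle, h⟩ := exists_collision n hn
    exact le_trans (Nat.find_le h) hjle
  have hrun := runA n J hJ hmin (n.natAbs + 1) 0 (Nat.zero_le _)
      (fun hn1 => by omega) (by omega)
  have h0 : cpos n 0 = 0 := rfl
  have hiff : (n.toNat ≤ J) ↔ ∀ j < n.toNat, ¬ ∃ i < j, cpos n i = cpos n j :=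
    Nat.le_find_iff hex n.toNat
  unfold will_visit_all_cups
  have hempty : (PySem.Set.empty : PySem.Set Int) = (List.range 0).map (cpos n) := rfl
  rw [hempty, ← h0, hrun]
  by_cases h1 : 1 ≤ n
  · by_cases h2 : n.toNat ≤ J
    · rw [if_pos ⟨h1, h2⟩, if_pos ⟨h1, hiff.mp h2⟩]
    · rw [if_neg (by tauto), if_neg (by rw [hiff] at h2; tauto)]
  · rw [if_neg (by tauto), if_neg (by tauto)]

-- number theory: the first m triangular numbers are distinct mod m iff m is a power of two
theorem cop_pow_two (t x : Nat) (hx : x % 2 = 1) : Nat.Coprime (2^t) x := by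
  apply Nat.Coprime.pow_left
  rw [Nat.coprime_two_left, Nat.odd_iff]
  exact hx

theorem tri_mono {i j : Nat} (h : i ≤ j) : tri i ≤ tri j := by
  have h1 := tri_two i
  have h2 := tri_two j
  have h3 : i * (i+1) ≤ j * (j+1) := Nat.mul_le_mul h (by omega)
  omega

theorem collide_aux (m x y : Nat) (hm : 1 ≤ m) (hxy : x * y = 2*m) (hx1 : 1 ≤ x)
    (hpar : (x + y) % 2 = 1) (hsum : x + y ≤ 2*m - 1) (hlt : x < y) :
    ∃ i j, i < j ∧ j < m ∧ tri j = tri i + m := by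
  obtain ⟨i, hi⟩ : ∃ i, y = x + 2*i + 1 := ⟨(y - x - 1)/2, by omega⟩
  refine ⟨i, i + x, by omega, by omega, ?_⟩
  have h1 := tri_two (i + x)
  have h2 := tri_two i
  have h3 : (i+x) * (i+x+1) = i*(i+1) + x*(x + 2*i + 1) := by ring
  have h4 : x * (x + 2*i + 1) = x * y := by rw [hi]
  omega

theorem nt_backward (k : Nat) (i j : Nat) (hij : i < j) (hjm : j < 2^k)
    (hdvd : ((2^k : Nat) : Int) ∣ ((tri j : Int) - tri i)) : False := by
  have hmono : tri i ≤ tri j := tri_mono (by omega)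
  have hdvdN : (2^k : Nat) ∣ (tri j - tri i) := by
    rwa [← Int.natCast_sub hmono, Int.natCast_dvd_natCast] at hdvd
  have hdvd2 : (2^(k+1) : Nat) ∣ 2 * (tri j - tri i) := by
    rw [pow_succ, mul_comm (2^k) 2]
    exact Nat.mul_dvd_mul_left 2 hdvdN
  obtain ⟨d, hd⟩ : ∃ d, j = i + d := ⟨j - i, by omega⟩
  have hdpos : 1 ≤ d := by omega
  have hkey : 2 * (tri j - tri i) = d * (2*i + d + 1) := by
    have h1 := tri_two (i + d)
    have h2 := tri_two i
    have h3 : (i+d)*(i+d+1) = i*(i+1) + d*(2*i+d+1) := by ring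
    subst hd; omega
  rw [hkey] at hdvd2
  by_cases hpar : d % 2 = 1
  · -- d odd: 2^(k+1) ∣ (2i+d+1), but 0 < 2i+d+1 < 2^(k+1)
    have hcop := cop_pow_two (k+1) d hpar
    have hdvds : (2^(k+1) : Nat) ∣ (2*i + d + 1) :=
      Nat.Coprime.dvd_of_dvd_mul_left hcop hdvd2
    have hle := Nat.le_of_dvd (by omega) hdvds
    have hlt2 : 2*i + d + 1 < 2^(k+1) := by
      have : 2^(k+1) = 2 * 2^k := by rw [pow_succ]; ring
      omega
    omega
  · -- d even: 2i+d+1 odd, 2^(k+1) ∣ d, but 0 < d < 2^(k+1)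
    have hodd : (2*i + d + 1) % 2 = 1 := by omega
    have hcop := cop_pow_two (k+1) _ hodd
    have hdvds : (2^(k+1) : Nat) ∣ d := Nat.Coprime.dvd_of_dvd_mul_right hcop hdvd2
    have hle := Nat.le_of_dvd (by omega) hdvds
    have hlt2 : d < 2^(k+1) := by
      have : 2^(k+1) = 2 * 2^k := by rw [pow_succ]; ring
      omega
    omega

theorem nt_forward (m : Nat) (hm : 1 ≤ m) (hnp : ¬ ∃ k, m = 2^k) :
    ∃ i j, i < j ∧ j < m ∧ ((m : Nat) : Int) ∣ ((tri j : Int) - tri i) := by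
  set a := m.factorization 2 with ha
  set b := m / 2 ^ (m.factorization 2) with hb
  have hfact : 2^a * b = m := Nat.ordProj_mul_ordCompl_eq_self m 2
  have hbodd : ¬ 2 ∣ b := Nat.not_dvd_ordCompl Nat.prime_two (by omega)
  have hbpos : 1 ≤ b := by
    rcases Nat.eq_zero_or_pos b with h | h
    · rw [h, mul_zero] at hfact; omega
    · exact h
  have hb1 : b ≠ 1 := by
    intro h
    rw [h, mul_one] at hfact
    exact hnp ⟨a, hfact.symm⟩
  have hb3 : 3 ≤ b := by omega
  set c := 2^(a+1) with hc
  have hcb : c * b = 2 * m := by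
    rw [hc, pow_succ, mul_comm (2^a) 2, mul_assoc, hfact]
  have hc2 : 2 ≤ c := by
    have : 2^1 ≤ 2^(a+1) := Nat.pow_le_pow_right (by norm_num) (by omega)
    simpa using this
  have hceven : c % 2 = 0 := by
    have : 2 ∣ c := by
      rw [hc]
      exact dvd_pow_self 2 (by omega)
    omega
  have hbodd' : b % 2 = 1 := by omega
  have hsum : c + b ≤ 2*m - 1 := by
    obtain ⟨c', hc'⟩ : ∃ c', c = c' + 2 := ⟨c - 2, by omega⟩
    obtain ⟨b', hb'⟩ : ∃ b', b = b' + 3 := ⟨b - 3, by omega⟩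
    have hexp : (c' + 2) * (b' + 3) = c'*b' + 3*c' + 2*b' + 6 := by ring
    rw [hc', hb'] at hcb
    rw [hc', hb']
    omega
  have hne : c ≠ b := by omega
  obtain ⟨i, j, hij, hjm, htri⟩ : ∃ i j, i < j ∧ j < m ∧ tri j = tri i + m := by
    rcases Nat.lt_or_ge c b with h | h
    · exact collide_aux m c b hm hcb (by omega) (by omega) hsum h
    · have hlt : b < c := by omega
      exact collide_aux m b c hm (by rw [mul_comm]; exact hcb) (by omega) (by omega)
        (by omega) hlt
  refine ⟨i, j, hij, hjm, ?_⟩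
  rw [htri]
  push_cast
  simp

-- B's helper: oddPart n = 1 iff n is a power of two (for 1 ≤ n)
theorem oddPart_one_iff (n : Int) (hn : 1 ≤ n) : oddPart n = 1 ↔ ∃ k : Nat, n = 2^k := by
  induction hi : n.toNat using Nat.strong_induction_on generalizing n with
  | _ m ih =>
  rw [oddPart]
  by_cases h : 1 ≤ n ∧ PySem.Int.mod n 2 = 0
  · rw [dif_pos h]
    have h2 : (2:Int) ∣ n := (PySem.Int.mod_eq_zero_iff_dvd n 2).mp h.2
    have hf : PySem.Int.floordiv n 2 = n / 2 := PySem.Int.floordiv_eq_ediv_of_pos (by norm_num)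
    have hn2 : 2 ≤ n := by omega
    have hhalf : 1 ≤ n / 2 := by omega
    have hrec := ih (n / 2).toNat (by omega) (n / 2) hhalf rfl
    rw [hf, hrec]
    constructor
    · rintro ⟨k, hk⟩
      exact ⟨k + 1, by rw [pow_succ]; omega⟩
    · rintro ⟨k, hk⟩
      cases k with
      | zero => simp at hk; omega
      | succ k =>
        refine ⟨k, ?_⟩
        rw [pow_succ] at hk
        omega
  · rw [dif_neg h]
    have hodd : PySem.Int.mod n 2 ≠ 0 := by tauto
    have hmod : PySem.Int.mod n 2 = n % 2 := PySem.Int.mod_eq_emod_of_pos (by norm_num)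
    rw [hmod] at hodd
    constructor
    · rintro rfl
      exact ⟨0, by norm_num⟩
    · rintro ⟨k, hk⟩
      cases k with
      | zero => simpa using hk
      | succ k =>
        exfalso
        rw [pow_succ] at hk
        omega

-- ===== VERDICT (by name: the statement is the Claim_ definition above) =====
theorem will_visit_all_cups_spec : Claim_equal_will_visit_all_cups := by
  intro n _ hpre
  unfold Spec_will_visit_all_cups will_visit_all_cups_alt
  have hn : n ≠ 0 := hpre
  rw [A_char n hn]
  by_cases h1 : 1 ≤ n
  · rw [if_neg (by omega : ¬ n ≤ 0)]
    set m := n.toNat with hm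
    have hm1 : 1 ≤ m := by omega
    have hcast : (m : Int) = n := by omega
    have hiff1 : (∀ j < m, ¬ ∃ i < j, cpos n i = cpos n j)
        ↔ (∀ i j, i < j → j < m → ¬ ((m : Int) ∣ ((tri j : Int) - tri i))) := by
      constructor
      · intro h i j hij hjm hdvd
        exact h j hjm ⟨i, hij, (cpos_eq_iff hn i j).mpr (hcast ▸ hdvd)⟩
      · rintro h j hjm ⟨i, hij, he⟩
        exact h i j hij hjm (hcast ▸ (cpos_eq_iff hn i j).mp he)
    have hiff2 : (∀ i j, i < j → j < m → ¬ ((m : Int) ∣ ((tri j : Int) - tri i)))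
        ↔ ∃ k : Nat, m = 2^k := by
      constructor
      · intro h
        by_contra hnp
        obtain ⟨i, j, hij, hjm, hdvd⟩ := nt_forward m hm1 hnp
        exact h i j hij hjm hdvd
      · rintro ⟨k, hk⟩ i j hij hjm hdvd
        rw [hk] at hjm hdvd
        exact nt_backward k i j hij hjm hdvd
    have hiff3 : (∃ k : Nat, m = 2^k) ↔ ∃ k : Nat, n = 2^k := by
      constructor
      · rintro ⟨k, hk⟩
        refine ⟨k, ?_⟩
        rw [← hcast, hk]
        push_cast
        ring
      · rintro ⟨k, hk⟩
        refine ⟨k, ?_⟩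
        have : ((2^k : Nat) : Int) = 2^k := by push_cast; ring
        omega
    have hop := oddPart_one_iff n h1
    by_cases hc : ∀ j < m, ¬ ∃ i < j, cpos n i = cpos n j
    · rw [if_pos ⟨h1, hc⟩, if_pos (hop.mpr (hiff3.mp (hiff2.mp (hiff1.mp hc))))]
    · rw [if_neg (by tauto), if_neg ?_]
      intro hone
      exact hc (hiff1.mpr (hiff2.mpr (hiff3.mpr (hop.mp hone))))
  · rw [if_neg (by tauto), if_pos (by omega : n ≤ 0)]
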